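-- pv_equiv track=rewrite | github.com/AkaShep/elite-voice-control | scr/integration/elite_integration.py | parse_ship_mode
-- ===== SOURCE A (Python) =====
-- def parse_ship_mode(flags: int) -> str:
--     """Определение режима корабля по флагам"""
--     modes = []
--     for flag, mode in {
--         1 << 0: "Docked",
--         1 << 1: "Landed",
--         1 << 2: "LandingGear",
--         1 << 3: "Shields",
--         1 << 4: "Supercruise",
--         1 << 5: "FlightAssist",
--         1 << 6: "Hardpoints",
--         1 << 7: "Winging",
--         1 << 8: "Lights",
--         1 << 9: "CargoScoop",
--         1 << 10: "SilentRunning",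
--         1 << 11: "Scooping",
--         1 << 12: "SRVHandbrake",
--         1 << 13: "SRVTurret",
--         1 << 14: "SRVUnderShip",
--         1 << 15: "SRVDriveAssist",
--         1 << 16: "FSDMassLocked",
--         1 << 17: "FSDCharging",
--         1 << 18: "FSDCooldown",
--         1 << 19: "LowFuel",
--         1 << 20: "Overheating",
--         1 << 21: "HasLatLong",
--         1 << 22: "InDanger",
--         1 << 23: "InInterdiction",
--         1 << 24: "InMothership",
--         1 << 25: "InFighter",
--         1 << 26: "InSRV",
--         1 << 27: "AnalysisMode",
--         1 << 28: "NightVision"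
--     }.items():
--         if flags & flag:
--             modes.append(mode)
--     return ", ".join(modes) if modes else "Unknown"
-- ===== SOURCE B (Python) =====
-- def parse_ship_mode(flags: int) -> str:
--     """Определение режима корабля по флагам"""
--     names = (
--         "Docked", "Landed", "LandingGear", "Shields", "Supercruise",
--         "FlightAssist", "Hardpoints", "Winging", "Lights", "CargoScoop",
--         "SilentRunning", "Scooping", "SRVHandbrake", "SRVTurret",
--         "SRVUnderShip", "SRVDriveAssist", "FSDMassLocked", "FSDCharging",
--         "FSDCooldown", "LowFuel", "Overheating", "HasLatLong", "InDanger",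
--         "InInterdiction", "InMothership", "InFighter", "InSRV",
--         "AnalysisMode", "NightVision",
--     )
--     m = flags & ((1 << 29) - 1)
--     modes = []
--     while m:
--         m2 = m & (m - 1)          # m with its lowest set bit cleared
--         low = m ^ m2              # the lowest set bit itself
--         modes.append(names[low.bit_length() - 1])
--         m = m2
--     return ", ".join(modes) if modes else "Unknown"
-- ===== Notes on version B (the rewrite author's own statement) =====
-- stated objective: alternative
-- what changed: Instead of scanning all 29 entries of a flag-to-name dict and testing flags & flag on each, B masks flags once to its low 29 bits and then pops only the SET bits with m &= m-1 / bit_length, looking each name up in a tuple indexed by bit position.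
import Mathlib
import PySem

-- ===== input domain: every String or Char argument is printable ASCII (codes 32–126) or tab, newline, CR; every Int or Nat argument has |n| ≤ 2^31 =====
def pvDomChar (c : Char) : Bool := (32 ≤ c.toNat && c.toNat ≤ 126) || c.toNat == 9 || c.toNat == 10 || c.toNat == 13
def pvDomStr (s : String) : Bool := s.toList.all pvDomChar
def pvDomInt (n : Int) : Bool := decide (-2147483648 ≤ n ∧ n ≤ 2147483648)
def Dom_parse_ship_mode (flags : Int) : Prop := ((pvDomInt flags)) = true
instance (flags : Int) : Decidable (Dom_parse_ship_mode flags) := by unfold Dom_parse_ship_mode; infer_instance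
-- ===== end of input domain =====

-- B replaces A's scan over a 29-entry flag→name dict by masking once and popping only the SET bits
-- (m &= m-1 / bit_length) in ascending order: an alternative algorithm, same exact output.

-- ===== PORT A =====
-- the dict literal {1<<0: "Docked", …}.items(), in insertion order
def pvPairs : List (Int × String) :=
  [(1 <<< 0, "Docked"), (1 <<< 1, "Landed"), (1 <<< 2, "LandingGear"), (1 <<< 3, "Shields"),
   (1 <<< 4, "Supercruise"), (1 <<< 5, "FlightAssist"), (1 <<< 6, "Hardpoints"), (1 <<< 7, "Winging"),
   (1 <<< 8, "Lights"), (1 <<< 9, "CargoScoop"), (1 <<< 10, "SilentRunning"), (1 <<< 11, "Scooping"),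
   (1 <<< 12, "SRVHandbrake"), (1 <<< 13, "SRVTurret"), (1 <<< 14, "SRVUnderShip"), (1 <<< 15, "SRVDriveAssist"),
   (1 <<< 16, "FSDMassLocked"), (1 <<< 17, "FSDCharging"), (1 <<< 18, "FSDCooldown"), (1 <<< 19, "LowFuel"),
   (1 <<< 20, "Overheating"), (1 <<< 21, "HasLatLong"), (1 <<< 22, "InDanger"), (1 <<< 23, "InInterdiction"),
   (1 <<< 24, "InMothership"), (1 <<< 25, "InFighter"), (1 <<< 26, "InSRV"), (1 <<< 27, "AnalysisMode"),
   (1 <<< 28, "NightVision")]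

def parse_ship_mode (flags : Int) : String :=
  -- for flag, mode in {...}.items(): if flags & flag: modes.append(mode)
  let modes := pvPairs.foldl (fun acc fm => if PySem.Int.band flags fm.1 ≠ 0 then acc ++ [fm.2] else acc) []
  if modes = [] then "Unknown" else PySem.Str.join ", " modes

-- ===== PORT B =====
def pvNames : List String :=
  ["Docked", "Landed", "LandingGear", "Shields", "Supercruise",
   "FlightAssist", "Hardpoints", "Winging", "Lights", "CargoScoop",
   "SilentRunning", "Scooping", "SRVHandbrake", "SRVTurret",
   "SRVUnderShip", "SRVDriveAssist", "FSDMassLocked", "FSDCharging",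
   "FSDCooldown", "LowFuel", "Overheating", "HasLatLong", "InDanger",
   "InInterdiction", "InMothership", "InFighter", "InSRV",
   "AnalysisMode", "NightVision"]

-- the `while m:` loop of Source B; m = flags & ((1<<29)-1) is nonnegative, so the Python int is
-- tracked as a Nat (exact); names[low.bit_length()-1] is always in range, getD is exact here
def pvLoop (names : List String) (m : Nat) : List String :=
  if h : m = 0 then []
  else
    let m2 := m &&& (m - 1)       -- m with its lowest set bit cleared
    let low := m ^^^ m2           -- the lowest set bit itself
    names.getD (PySem.Int.bitLength (low : Int) - 1) "" :: pvLoop names m2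
termination_by m
decreasing_by exact lt_of_le_of_lt Nat.and_le_right (by omega)

def parse_ship_mode_alt (flags : Int) : String :=
  let m := (PySem.Int.band flags ((1 <<< 29) - 1)).toNat
  let modes := pvLoop pvNames m
  if modes = [] then "Unknown" else PySem.Str.join ", " modes

-- ===== PRECONDITION & SPEC =====
def Spec_parse_ship_mode (flags : Int) (out : String) : Prop := out = parse_ship_mode_alt flags
instance (flags : Int) (out : String) : Decidable (Spec_parse_ship_mode flags out) := by unfold Spec_parse_ship_mode; infer_instance

-- ===== CLAIM (what is proved, stated in full; the proofs are below) =====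
def Claim_equal_parse_ship_mode : Prop := ∀ (flags : Int), Dom_parse_ship_mode flags → Spec_parse_ship_mode flags (parse_ship_mode flags)

-- ===== LEMMAS AND PROOFS =====

-- the masked value both programs read their bits from
def pvN (flags : Int) : Nat := (PySem.Int.band flags ((1 <<< 29) - 1)).toNat

lemma pv_band_neg (a : Nat) (B : Nat) :
    PySem.Int.band (Int.negSucc a) ((B : Nat) : Int) = ((B - (B &&& a) : Nat) : Int) := by
  have h1 : ¬ (0 ≤ Int.negSucc a) := by simp [Int.negSucc_eq]; omega
  have h2 : (-(Int.negSucc a) - 1).toNat = a := by simp [Int.negSucc_eq]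
  simp [PySem.Int.band, h1]

lemma pv_band_nonneg (a : Nat) (B : Nat) :
    PySem.Int.band ((a : Nat) : Int) ((B : Nat) : Int) = ((a &&& B : Nat) : Int) := by
  rw [PySem.Int.band_of_nonneg (by positivity) (by positivity)]
  simp

lemma pvN_lt (flags : Int) : pvN flags < 2 ^ 29 := by
  unfold pvN
  rw [show ((1 <<< 29 : Int) - 1) = ((2 ^ 29 - 1 : Nat) : Int) by decide]
  rcases flags with a | a
  · rw [show (Int.ofNat a) = ((a : Nat) : Int) from rfl, pv_band_nonneg]
    simp
    exact lt_of_le_of_lt Nat.and_le_right (by norm_num)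
  · rw [pv_band_neg]
    simp
    omega

-- bit i of A's test (flags & 2^i) is bit i of the 29-bit masked value pvN
lemma pv_key (flags : Int) (i : Nat) (hi : i < 29) :
    (PySem.Int.band flags ((2 : Int) ^ i) ≠ 0) ↔ (pvN flags).testBit i = true := by
  unfold pvN
  have hpow : ((2 : Int) ^ i) = ((2 ^ i : Nat) : Int) := by push_cast; ring
  have hmask : ((1 <<< 29 : Int) - 1) = ((2 ^ 29 - 1 : Nat) : Int) := by decide
  rw [hpow, hmask]
  rcases flags with a | a
  · rw [show (Int.ofNat a) = ((a : Nat) : Int) from rfl, pv_band_nonneg, pv_band_nonneg]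
    rw [Nat.and_two_pow_sub_one_eq_mod]
    simp only [Int.toNat_natCast, Nat.testBit_mod_two_pow, hi, decide_true, Bool.true_and]
    rw [Nat.and_two_pow]
    rcases Bool.eq_false_or_eq_true (a.testBit i) with hb | hb <;>
      simp [hb]
  · rw [pv_band_neg, pv_band_neg]
    rw [show ((2 ^ 29 - 1) &&& a) = a % 2 ^ 29 by
      rw [Nat.land_comm, Nat.and_two_pow_sub_one_eq_mod]]
    have hmod : a % 2 ^ 29 < 2 ^ 29 := Nat.mod_lt _ (by norm_num)
    have hsub : 2 ^ 29 - 1 - a % 2 ^ 29 = 2 ^ 29 - (a % 2 ^ 29 + 1) := by omega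
    have hand : 2 ^ i &&& a = (a.testBit i).toNat * 2 ^ i := by
      rw [Nat.land_comm, Nat.and_two_pow]
    simp only [Int.toNat_natCast, hsub, Nat.testBit_two_pow_sub_succ hmod,
      Nat.testBit_mod_two_pow, hi, decide_true, Bool.true_and, hand]
    rcases Bool.eq_false_or_eq_true (a.testBit i) with hb | hb <;>
      simp [hb]

lemma pv_getD_drop_one (names : List String) (k : Nat) (d : String) :
    names.getD (k + 1) d = (names.drop 1).getD k d := by
  cases names <;> simp [List.getD]

lemma pv_bit_odd_and (a : Nat) : (2 * a + 1) &&& (2 * a) = 2 * a := by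
  apply Nat.eq_of_testBit_eq
  intro i
  rw [Nat.testBit_land]
  cases i with
  | zero => simp [Nat.testBit_zero]
  | succ j =>
    have h1 : (2 * a + 1) / 2 = a := by omega
    have h2 : (2 * a) / 2 = a := by omega
    simp [Nat.testBit_succ, h1, h2]

lemma pv_bit_odd_xor (a : Nat) : (2 * a + 1) ^^^ (2 * a) = 1 := by
  apply Nat.eq_of_testBit_eq
  intro i
  rw [Nat.testBit_xor]
  cases i with
  | zero => simp [Nat.testBit_zero]
  | succ j =>
    have h1 : (2 * a + 1) / 2 = a := by omega
    have h2 : (2 * a) / 2 = a := by omega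
    simp [Nat.testBit_succ, h1, h2]

lemma pv_bit_even_and (a : Nat) : (2 * a) &&& (2 * a - 1) = 2 * (a &&& (a - 1)) := by
  rcases Nat.eq_zero_or_pos a with h | h
  · simp [h]
  apply Nat.eq_of_testBit_eq
  intro i
  rw [Nat.testBit_land]
  cases i with
  | zero => simp [Nat.testBit_zero]
  | succ j =>
    have h1 : (2 * a) / 2 = a := by omega
    have h2 : (2 * a - 1) / 2 = a - 1 := by omega
    have h3 : (2 * (a &&& (a - 1))) / 2 = a &&& (a - 1) := by omega
    simp [Nat.testBit_succ, h1, h2, h3]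

lemma pv_bit_even_xor (a c : Nat) : (2 * a) ^^^ (2 * c) = 2 * (a ^^^ c) := by
  apply Nat.eq_of_testBit_eq
  intro i
  rw [Nat.testBit_xor]
  cases i with
  | zero => simp [Nat.testBit_zero]
  | succ j =>
    have h1 : (2 * a) / 2 = a := by omega
    have h2 : (2 * c) / 2 = c := by omega
    have h3 : (2 * (a ^^^ c)) / 2 = a ^^^ c := by omega
    simp [Nat.testBit_succ, h1, h2, h3]

-- popping the lowest set bit of an even number = popping on the half, one name further in
lemma pv_loop_even (a : Nat) (names : List String) :
    pvLoop names (2 * a) = pvLoop (names.drop 1) a := by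
  induction a using Nat.strong_induction_on generalizing names with
  | _ a ih =>
    rcases Nat.eq_zero_or_pos a with h0 | h0
    · subst h0; rw [pvLoop, pvLoop]; simp
    have hne : 2 * a ≠ 0 := by omega
    have hlt : a &&& (a - 1) < a := lt_of_le_of_lt Nat.and_le_right (by omega)
    rw [pvLoop, pvLoop]
    simp only [hne, dif_neg (by omega : a ≠ 0)]
    rw [pv_bit_even_and, pv_bit_even_xor]
    set b' := a ^^^ (a &&& (a - 1)) with hb
    have hb0 : b' ≠ 0 := by
      intro h
      exact absurd (Nat.xor_eq_zero_iff.mp h).symm (Nat.ne_of_lt hlt)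
    have hbl : PySem.Int.bitLength ((2 * b' : Nat) : Int) = PySem.Int.bitLength (b' : Int) + 1 := by
      rw [PySem.Int.bitLength_natCast (by omega : 0 < 2 * b')]
      congr 2
      omega
    have hbl1 : 1 ≤ PySem.Int.bitLength (b' : Int) := by
      rw [PySem.Int.bitLength_natCast (by omega : 0 < b')]
      omega
    rw [hbl]
    have hidx : PySem.Int.bitLength ((b' : Nat) : Int) + 1 - 1
        = (PySem.Int.bitLength ((b' : Nat) : Int) - 1) + 1 := by omega
    rw [hidx, pv_getD_drop_one]
    rw [ih (a &&& (a - 1)) hlt names]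
    simp

lemma pv_shift (x : String) (rest : List String) (m a : Nat) (hdiv : m / 2 = a) :
    List.map (fun i => (x :: rest).getD i "")
        (List.map Nat.succ (List.filter (m.testBit ∘ Nat.succ) (List.range rest.length)))
      = List.map (fun i => rest.getD i "") (List.filter a.testBit (List.range rest.length)) := by
  rw [List.map_map]
  have hf : List.filter (m.testBit ∘ Nat.succ) (List.range rest.length)
      = List.filter a.testBit (List.range rest.length) := by
    apply List.filter_congr
    intro i _
    simp [Function.comp, Nat.testBit_succ, hdiv]
  rw [hf]
  apply List.map_congr_left
  intro i _
  simp [Function.comp, List.getD]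

-- B's loop yields exactly the names of the set bits of m, in ascending bit order
lemma pv_loop_spec (names : List String) (m : Nat) (h : m < 2 ^ names.length) :
    pvLoop names m = ((List.range names.length).filter m.testBit).map (fun i => names.getD i "") := by
  induction names generalizing m with
  | nil =>
    have hm : m = 0 := by simp at h; omega
    subst hm
    rw [pvLoop]; simp
  | cons x rest ih =>
    rcases Nat.even_or_odd m with ⟨a, ha⟩ | ⟨a, ha⟩
    · have ha' : m = 2 * a := by omega
      subst ha'
      have hlt : a < 2 ^ rest.length := by
        simp [List.length_cons, pow_succ] at h; omega
      rw [pv_loop_even, List.drop_one, List.tail_cons, ih a hlt]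
      rw [List.length_cons, List.range_succ_eq_map, List.filter_cons]
      have hb0 : (2 * a).testBit 0 = false := by
        simp [Nat.testBit_zero]
      rw [hb0]
      simp only [Bool.false_eq_true, if_false]
      rw [List.filter_map]
      rw [pv_shift x rest (2 * a) a (by omega)]
    · subst ha
      have hlt : a < 2 ^ rest.length := by
        simp [List.length_cons, pow_succ] at h; omega
      rw [pvLoop]
      simp only [dif_neg (by omega : 2 * a + 1 ≠ 0), Nat.add_sub_cancel]
      rw [pv_bit_odd_and, pv_bit_odd_xor]
      have h1 : PySem.Int.bitLength ((1 : Nat) : Int) = 1 := by decide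
      rw [h1]
      rw [pv_loop_even, List.drop_one, List.tail_cons, ih a hlt]
      rw [List.length_cons, List.range_succ_eq_map, List.filter_cons]
      have hb0 : (2 * a + 1).testBit 0 = true := by
        simp [Nat.testBit_zero]
      rw [hb0]
      simp only [if_pos, List.map_cons]
      rw [List.filter_map]
      rw [pv_shift x rest (2 * a + 1) a (by omega)]

-- A's dict is the table of (2^i, names[i]) in bit order
lemma pv_pairs_eq : pvPairs = (List.range 29).map (fun i => ((2 : Int) ^ i, pvNames.getD i "")) := by
  decide

-- A's loop yields exactly the names of the set bits of pvN, in ascending bit order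
lemma pv_A_modes (flags : Int) :
    pvPairs.foldl (fun acc fm => if PySem.Int.band flags fm.1 ≠ 0 then acc ++ [fm.2] else acc) []
      = ((List.range 29).filter (pvN flags).testBit).map (fun i => pvNames.getD i "") := by
  rw [pv_pairs_eq, List.foldl_map]
  rw [PySem.List.foldl_congr_mem _ _
    (fun acc i => if (pvN flags).testBit i = true then acc ++ [pvNames.getD i ""] else acc) _
    (by
      intro acc i hmem
      exact if_congr (pv_key flags i (by simpa using List.mem_range.mp hmem)) rfl rfl)]
  exact PySem.List.foldl_append_if _ _ _ _

-- ===== VERDICT (by name: the statement is the Claim_ definition above) =====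
theorem parse_ship_mode_spec : Claim_equal_parse_ship_mode := by
  intro flags _
  unfold Spec_parse_ship_mode parse_ship_mode parse_ship_mode_alt
  have h1 := pv_A_modes flags
  have h2 := pv_loop_spec pvNames (pvN flags) (by simpa [pvNames] using pvN_lt flags)
  simp only [pvN, show pvNames.length = 29 from rfl] at h1 h2
  rw [h1, ← h2]
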